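-- pv_equiv track=rewrite | github.com/SandeepK1729/AI-lab | week-13 backward chaining.py | check
-- ===== SOURCE A (Python) =====
-- def check(knowns, facts):
--     result = []
--     for known in knowns:
--         for A, B in facts:
--             if known == B and (A, B) not in result:
--                 result.append((A, B))
--                 knowns.append(A)
--     return result
-- ===== SOURCE B (Python) =====
-- def check(knowns, facts):
--     # Phase 1: deduplicate facts (keeping first occurrences) and group them
--     # into buckets keyed by their consequent, once.
--     # Phase 2: level-synchronous frontier expansion: each frontier string not
--     # processed before empties its whole bucket into the result at once; the
--     # antecedents of the emitted facts form the next frontier.  There is no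
--     # growing worklist indexed in place, no scan of all facts per known, and
--     # no membership test on the result (a processed-strings set replaces it).
--     # Unlike A, B does not mutate `knowns`; equivalence is about the return value.
--     buckets = {}
--     distinct = set()
--     for f in facts:
--         if f not in distinct:
--             distinct.add(f)
--             buckets.setdefault(f[1], []).append(f)
--     result = []
--     done = set()
--     frontier = list(knowns)
--     while frontier:
--         nxt = []
--         for s in frontier:
--             if s not in done:
--                 done.add(s)
--                 bucket = buckets.get(s, [])
--                 result += bucket
--                 nxt += [a for a, _ in bucket]
--         frontier = nxt
--     return result
-- ===== Notes on version B (the rewrite author's own statement) =====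
-- stated objective: faster
-- what changed: B first deduplicates and groups the facts into buckets keyed by consequent, then expands the closure level by level (frontier of newly derived antecedents, processed-strings set), so A's per-known scan of all facts, its linear 'in result' test and its in-place growing worklist all disappear.
import Mathlib
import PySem

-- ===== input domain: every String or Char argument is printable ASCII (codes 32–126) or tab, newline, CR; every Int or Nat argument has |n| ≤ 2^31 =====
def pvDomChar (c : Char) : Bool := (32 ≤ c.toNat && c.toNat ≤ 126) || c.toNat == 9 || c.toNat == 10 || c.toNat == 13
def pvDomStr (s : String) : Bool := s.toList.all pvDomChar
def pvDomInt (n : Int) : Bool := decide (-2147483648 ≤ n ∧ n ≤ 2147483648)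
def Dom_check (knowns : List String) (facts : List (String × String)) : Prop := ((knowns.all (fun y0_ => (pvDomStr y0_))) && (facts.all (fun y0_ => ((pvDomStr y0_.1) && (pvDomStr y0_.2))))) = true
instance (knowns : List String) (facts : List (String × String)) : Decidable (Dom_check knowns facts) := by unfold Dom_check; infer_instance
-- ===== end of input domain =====

-- B deduplicates and groups the facts by consequent once, then expands frontier levels with a
-- processed-strings set: no growing worklist scanned in place, no per-known pass over all facts,
-- no membership test on the result.  A mutates `knowns` in place, B does not; the equivalence
-- proved here is about the return value only.

-- ===== PORT A =====
-- inner 'for A, B in facts' loop; state = (result, knowns)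
def checkInnerA (known : String) (facts : List (String × String))
    (st : List (String × String) × List String) : List (String × String) × List String :=
  facts.foldl (fun st f =>
    if known == f.2 && !(st.1.contains f) then (st.1 ++ [f], st.2 ++ [f.1]) else st) st

-- 'for known in knowns' over the growing list = iteration by index; Python's loop always
-- terminates because each append to knowns matches a distinct fact appended to result, so the
-- final length of knowns is ≤ knowns.length + facts.length: that fuel is always sufficient.
def checkLoopA (fuel : Nat) (facts : List (String × String))
    (knowns : List String) (i : Nat) (result : List (String × String)) :
    List (String × String) :=
  match fuel with
  | 0 => result
  | fuel + 1 =>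
    match knowns[i]? with
    | none => result
    | some known =>
      let st := checkInnerA known facts (result, knowns)
      checkLoopA fuel facts st.2 (i + 1) st.1

def check (knowns : List String) (facts : List (String × String)) : List (String × String) :=
  checkLoopA (knowns.length + facts.length) facts knowns 0 []

-- ===== PORT B =====
-- phase 1: 'if f not in distinct: distinct.add(f); buckets.setdefault(f[1], []).append(f)'
def dedupGroupB (facts : List (String × String)) :
    PySem.Set (String × String) × PySem.Dict String (List (String × String)) :=
  facts.foldl (fun st f =>
    if PySem.Set.contains st.1 f then st
    else (PySem.Set.add st.1 f, st.2.modify f.2 [] (· ++ [f])))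
    (PySem.Set.empty, PySem.Dict.empty)

-- phase 2: 'while frontier: for s in frontier: …; frontier = nxt'.  The for-loop is the
-- recursion on `rest`; the while-loop carries fuel: each new nonempty frontier requires at
-- least one fact emitted in the previous level, so facts.length + 1 levels always suffice.
def loopB (fuel : Nat) (buckets : PySem.Dict String (List (String × String)))
    (rest nextf : List String) (done : PySem.Set String)
    (result : List (String × String)) : List (String × String) :=
  match rest with
  | s :: rest' =>
    if PySem.Set.contains done s then
      loopB fuel buckets rest' nextf done result
    else
      loopB fuel buckets rest' (nextf ++ (buckets.getD s []).map (·.1))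
        (PySem.Set.add done s) (result ++ buckets.getD s [])
  | [] =>
    match nextf with
    | [] => result
    | _ :: _ =>
      match fuel with
      | 0 => result
      | fuel' + 1 => loopB fuel' buckets nextf [] done result
  termination_by (fuel, rest.length)

def check_alt (knowns : List String) (facts : List (String × String)) :
    List (String × String) :=
  loopB (facts.length + 1) (dedupGroupB facts).2 knowns [] PySem.Set.empty []

-- ===== PRECONDITION & SPEC =====
def Spec_check (knowns : List String) (facts : List (String × String)) (out : List (String × String)) : Prop := out = check_alt knowns facts
instance (knowns : List String) (facts : List (String × String)) (out : List (String × String)) : Decidable (Spec_check knowns facts out) := by unfold Spec_check; infer_instance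

-- ===== CLAIM (what is proved, stated in full; the proofs are below) =====
def Claim_equal_check : Prop := ∀ (knowns : List String) (facts : List (String × String)), Dom_check knowns facts → Spec_check knowns facts (check knowns facts)

-- ===== LEMMAS AND PROOFS =====

-- dedup keeping first occurrences, relative to an already-seen list
def ddf (seen : List (String × String)) : List (String × String) → List (String × String)
  | [] => []
  | f :: l => if f ∈ seen then ddf seen l else f :: ddf (f :: seen) l

theorem mem_ddf (l : List (String × String)) : ∀ (seen : List (String × String))
    (f : String × String), f ∈ ddf seen l ↔ f ∈ l ∧ f ∉ seen := by
  induction l with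
  | nil => intro seen f; simp [ddf]
  | cons g l ih =>
    intro seen f
    by_cases hg : g ∈ seen
    · rw [ddf, if_pos hg, ih]
      constructor
      · rintro ⟨h1, h2⟩; exact ⟨List.mem_cons_of_mem _ h1, h2⟩
      · rintro ⟨h1, h2⟩
        rcases List.mem_cons.1 h1 with rfl | h1
        · exact absurd hg h2
        · exact ⟨h1, h2⟩
    · rw [ddf, if_neg hg]
      simp only [List.mem_cons, ih]
      by_cases hf : f = g
      · subst hf; simp [hg]
      · simp [hf]

theorem nodup_ddf (l : List (String × String)) : ∀ (seen : List (String × String)),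
    (ddf seen l).Nodup := by
  induction l with
  | nil => intro seen; simp [ddf]
  | cons g l ih =>
    intro seen
    by_cases hg : g ∈ seen
    · rw [ddf, if_pos hg]; exact ih seen
    · rw [ddf, if_neg hg]
      refine List.nodup_cons.2 ⟨fun hmem => ?_, ih _⟩
      exact ((mem_ddf l _ g).1 hmem).2 (List.mem_cons_self)

-- the bucket of consequent s: the distinct facts whose second component is s, in order
def bkt (facts : List (String × String)) (s : String) : List (String × String) :=
  (ddf [] facts).filter (fun f => f.2 == s)

theorem mem_bkt (facts : List (String × String)) (s : String) (f : String × String) :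
    f ∈ bkt facts s ↔ f ∈ facts ∧ f.2 = s := by
  simp [bkt, List.mem_filter, mem_ddf]

theorem nodup_bkt (facts : List (String × String)) (s : String) : (bkt facts s).Nodup :=
  (nodup_ddf facts []).filter _

-- the dict built by dedupGroupB holds exactly the buckets
theorem dedupGroup_aux (l : List (String × String)) :
    ∀ (seen : PySem.Set (String × String)) (d : PySem.Dict String (List (String × String)))
      (S : List (String × String)),
      (∀ f, PySem.Set.contains seen f = true ↔ f ∈ S) →
      ∀ k, ((l.foldl (fun st f =>
          if PySem.Set.contains st.1 f then st
          else (PySem.Set.add st.1 f, st.2.modify f.2 [] (· ++ [f]))) (seen, d)).2).getD k []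
        = d.getD k [] ++ (ddf S l).filter (fun f => f.2 == k) := by
  induction l with
  | nil => intro seen d S _ k; simp [ddf]
  | cons f l ih =>
    intro seen d S hS k
    by_cases hf : f ∈ S
    · rw [List.foldl_cons, if_pos ((hS f).2 hf), ddf, if_pos hf]
      exact ih seen d S hS k
    · have hc : PySem.Set.contains seen f = false := by
        rcases Bool.eq_false_or_eq_true (PySem.Set.contains seen f) with h | h
        · exact absurd ((hS f).1 h) hf
        · exact h
      rw [List.foldl_cons, hc]
      simp only [Bool.false_eq_true, if_false, ddf, if_neg hf]
      rw [ih (PySem.Set.add seen f) (d.modify f.2 [] (· ++ [f])) (f :: S)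
        (by intro g
            rw [PySem.Set.contains_iff, PySem.Set.mem_add]
            simp only [List.mem_cons]
            rw [← PySem.Set.contains_iff, hS g]
            tauto)]
      by_cases hk : f.2 = k
      · rw [PySem.Dict.getD_modify, if_pos hk.symm]
        have : (f :: ddf (f :: S) l).filter (fun f => f.2 == k)
            = f :: (ddf (f :: S) l).filter (fun f => f.2 == k) := by
          simp [hk]
        rw [this, List.append_assoc, hk]
        rfl
      · rw [PySem.Dict.getD_modify, if_neg (fun h : k = f.2 => hk h.symm)]
        have : (f :: ddf (f :: S) l).filter (fun f => f.2 == k)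
            = (ddf (f :: S) l).filter (fun f => f.2 == k) := by
          simp [hk]
        rw [this]

theorem getD_dedupGroupB (facts : List (String × String)) (k : String) :
    ((dedupGroupB facts).2).getD k [] = bkt facts k := by
  rw [dedupGroupB, dedupGroup_aux facts PySem.Set.empty PySem.Dict.empty []
    (by intro f; rw [PySem.Set.contains_iff]; simp [PySem.Set.empty])]
  simp [bkt, PySem.Dict.getD_empty]

-- A's inner scan, characterised: it appends exactly the keep-first dedup of the facts with
-- consequent `known` not already accounted for by S (S a proxy for the result's members)
theorem innerA_eq (l : List (String × String)) : ∀ (s : String)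
    (result : List (String × String)) (queue : List String) (S : List (String × String)),
    (∀ f : String × String, f.2 = s → (f ∈ result ↔ f ∈ S)) →
    checkInnerA s l (result, queue)
      = (result ++ (ddf S l).filter (fun f => f.2 == s),
         queue ++ ((ddf S l).filter (fun f => f.2 == s)).map (·.1)) := by
  induction l with
  | nil => intro s result queue S _; simp [checkInnerA, ddf]
  | cons f l ih =>
    intro s result queue S hS
    rw [checkInnerA, List.foldl_cons]
    by_cases hf2 : f.2 = s
    · by_cases hfres : f ∈ result
      · have hcond : (s == f.2 && !(result.contains f)) = false := by
          simp [hfres]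
        rw [hcond]
        simp only [Bool.false_eq_true, if_false]
        have hfS : f ∈ S := (hS f hf2).1 hfres
        rw [ddf, if_pos hfS]
        exact ih s result queue S hS
      · have hfS : f ∉ S := fun h => hfres ((hS f hf2).2 h)
        have hcond : (s == f.2 && !(result.contains f)) = true := by
          simp [hf2, hfres]
        rw [hcond]
        simp only [if_true]
        have hfilt : (ddf S (f :: l)).filter (fun f => f.2 == s)
            = f :: (ddf (f :: S) l).filter (fun f => f.2 == s) := by
          rw [ddf, if_neg hfS]
          simp [hf2]
        have hrec := ih s (result ++ [f]) (queue ++ [f.1]) (f :: S)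
          (by intro g hg
              simp only [List.mem_append, List.mem_cons, hS g hg]
              tauto)
        rw [checkInnerA] at hrec
        rw [hrec, hfilt]
        simp [List.append_assoc]
    · have hcond : (s == f.2 && !(result.contains f)) = false := by
        have hne : s ≠ f.2 := fun h => hf2 h.symm
        simp [hne]
      rw [hcond]
      simp only [Bool.false_eq_true, if_false]
      by_cases hfS : f ∈ S
      · rw [ddf, if_pos hfS]; exact ih s result queue S hS
      · rw [ddf, if_neg hfS]
        simp only [List.filter_cons, show (f.2 == s) = false by simp [hf2]]
        refine ih s result queue (f :: S) ?_
        intro g hg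
        rw [hS g hg]
        simp only [List.mem_cons]
        constructor
        · exact Or.inr
        · rintro (rfl | h)
          · exact absurd hg hf2
          · exact h

-- with the result-invariant: a consequent already processed fires nothing …
theorem innerA_done (facts : List (String × String)) (result : List (String × String))
    (queue : List String) (tk : List String) (s : String)
    (hres : ∀ f : String × String, f ∈ result ↔ f ∈ facts ∧ f.2 ∈ tk) (hs : s ∈ tk) :
    checkInnerA s facts (result, queue) = (result, queue) := by
  rw [innerA_eq facts s result queue result (fun f _ => Iff.rfl)]
  have hnil : (ddf result facts).filter (fun f => f.2 == s) = [] := by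
    rw [List.filter_eq_nil_iff]
    intro f hf
    obtain ⟨hfl, hfr⟩ := (mem_ddf facts result f).1 hf
    intro hbeq
    have hf2 : f.2 = s := by simpa using hbeq
    exact hfr ((hres f).2 ⟨hfl, hf2 ▸ hs⟩)
  simp [hnil]

-- … and a fresh consequent fires exactly its bucket
theorem innerA_new (facts : List (String × String)) (result : List (String × String))
    (queue : List String) (tk : List String) (s : String)
    (hres : ∀ f : String × String, f ∈ result ↔ f ∈ facts ∧ f.2 ∈ tk) (hs : s ∉ tk) :
    checkInnerA s facts (result, queue)
      = (result ++ bkt facts s, queue ++ (bkt facts s).map (·.1)) := by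
  rw [innerA_eq facts s result queue []
    (by intro f hf
        simp only [List.not_mem_nil, iff_false]
        intro hfres
        exact hs (hf ▸ ((hres f).1 hfres).2))]
  rfl

theorem res_le (facts result : List (String × String)) (hnd : result.Nodup)
    (hsub : ∀ f ∈ result, f ∈ facts) : result.length ≤ facts.length :=
  (List.subperm_of_subset hnd hsub).length_le

theorem loopB_nil_nil (fuel : Nat) (b : PySem.Dict String (List (String × String)))
    (done : PySem.Set String) (result : List (String × String)) :
    loopB fuel b [] [] done result = result := by
  rw [loopB]

theorem loopB_transition (fuel : Nat) (b : PySem.Dict String (List (String × String)))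
    (n : String) (ns : List String) (done : PySem.Set String)
    (result : List (String × String)) :
    loopB (fuel + 1) b [] (n :: ns) done result = loopB fuel b (n :: ns) [] done result := by
  conv_lhs => rw [loopB]

theorem loopB_cons (fuel : Nat) (b : PySem.Dict String (List (String × String)))
    (s : String) (rest' nextf : List String) (done : PySem.Set String)
    (result : List (String × String)) :
    loopB fuel b (s :: rest') nextf done result
      = if PySem.Set.contains done s then loopB fuel b rest' nextf done result
        else loopB fuel b rest' (nextf ++ (b.getD s []).map (·.1))
          (PySem.Set.add done s) (result ++ b.getD s []) := by
  rw [loopB]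

-- one frontier level of B tracks A step by step; the transition to the next level is the
-- hypothesis IH (discharged by induction on the level fuel in `sim`)
theorem simLevel (facts : List (String × String)) (fb : Nat)
    (IH : ∀ (fr : List String) (fa : Nat) (queue : List String) (i : Nat)
        (done : PySem.Set String) (result : List (String × String)),
        i ≤ queue.length →
        queue.drop i = fr →
        (∀ t, PySem.Set.contains done t = true ↔ t ∈ queue.take i) →
        (∀ f : String × String, f ∈ result ↔ f ∈ facts ∧ f.2 ∈ queue.take i) →
        result.Nodup →
        queue.length + facts.length ≤ fa + result.length + i →
        1 + facts.length ≤ fb + result.length →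
        checkLoopA fa facts queue i result
          = loopB fb (dedupGroupB facts).2 fr [] done result) :
    ∀ (rest : List String) (fa : Nat) (queue : List String) (i : Nat)
      (nextf : List String) (done : PySem.Set String) (result : List (String × String)),
      i ≤ queue.length →
      queue.drop i = rest ++ nextf →
      (∀ t, PySem.Set.contains done t = true ↔ t ∈ queue.take i) →
      (∀ f : String × String, f ∈ result ↔ f ∈ facts ∧ f.2 ∈ queue.take i) →
      result.Nodup →
      queue.length + facts.length ≤ fa + result.length + i →
      1 + facts.length + nextf.length ≤ (fb + 1) + result.length →
      checkLoopA fa facts queue i result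
        = loopB (fb + 1) (dedupGroupB facts).2 rest nextf done result := by
  intro rest
  induction rest with
  | nil =>
    intro fa queue i nextf done result h1 h2 h3 h4 h5 h6 h7
    rw [List.nil_append] at h2
    cases nextf with
    | nil =>
      have hlen : queue.length ≤ i := by
        have := congrArg List.length h2
        simp only [List.length_drop, List.length_nil] at this
        omega
      have hA : checkLoopA fa facts queue i result = result := by
        cases fa with
        | zero => rfl
        | succ fa' =>
          rw [checkLoopA, List.getElem?_eq_none hlen]
      rw [hA, loopB_nil_nil]
    | cons n ns =>
      rw [loopB_transition]
      refine IH (n :: ns) fa queue i done result h1 h2 h3 h4 h5 h6 ?_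
      simp only [List.length_cons] at h7
      omega
  | cons s rest' ih =>
    intro fa queue i nextf done result h1 h2 h3 h4 h5 h6 h7
    rw [List.cons_append] at h2
    have hqi : queue[i]? = some s := by
      have h0 : (queue.drop i)[0]? = some s := by rw [h2]; rfl
      rw [List.getElem?_drop] at h0
      simpa using h0
    have hilt : i < queue.length := by
      rcases List.getElem?_eq_some_iff.1 hqi with ⟨h, _⟩
      exact h
    have hsub : ∀ f ∈ result, f ∈ facts := fun f hf => ((h4 f).1 hf).1
    have hrlen : result.length ≤ facts.length := res_le facts result h5 hsub
    obtain ⟨fa', rfl⟩ : ∃ fa', fa = fa' + 1 := ⟨fa - 1, by omega⟩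
    have hdrop : queue.drop (i + 1) = rest' ++ nextf := by
      have : queue.drop (i + 1) = (queue.drop i).drop 1 := by
        rw [List.drop_drop]
      rw [this, h2]
      rfl
    have htake : queue.take (i + 1) = queue.take i ++ [s] := by
      rw [List.take_add_one, hqi]
      rfl
    by_cases hsdone : s ∈ queue.take i
    · -- skipped string: nothing fires on either side
      rw [checkLoopA, hqi]
      simp only
      rw [innerA_done facts result queue (queue.take i) s h4 hsdone]
      rw [loopB_cons, if_pos ((h3 s).2 hsdone)]
      refine ih fa' queue (i + 1) nextf done result (by omega) hdrop ?_ ?_ h5 (by omega) h7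
      · intro t
        rw [h3 t, htake]
        simp only [List.mem_append, List.mem_singleton]
        constructor
        · exact Or.inl
        · rintro (h | rfl)
          · exact h
          · exact hsdone
      · intro f
        rw [h4 f, htake]
        simp only [List.mem_append, List.mem_singleton]
        constructor
        · rintro ⟨hl, hr⟩; exact ⟨hl, Or.inl hr⟩
        · rintro ⟨hl, h | rfl⟩
          · exact ⟨hl, h⟩
          · exact ⟨hl, hsdone⟩
    · -- fresh string: A fires its whole bucket, B empties the bucket into the result
      rw [checkLoopA, hqi]
      simp only
      rw [innerA_new facts result queue (queue.take i) s h4 hsdone]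
      have hcf : PySem.Set.contains done s = false := by
        cases h : PySem.Set.contains done s
        · rfl
        · exact absurd ((h3 s).1 h) hsdone
      rw [loopB_cons, hcf, getD_dedupGroupB]
      simp only [Bool.false_eq_true, if_false]
      refine ih fa' (queue ++ (bkt facts s).map (·.1)) (i + 1)
        (nextf ++ (bkt facts s).map (·.1)) (PySem.Set.add done s)
        (result ++ bkt facts s) ?_ ?_ ?_ ?_ ?_ ?_ ?_
      · simp only [List.length_append]; omega
      · rw [List.drop_append_of_le_length (by omega), hdrop, List.append_assoc]
      · intro t
        rw [List.take_append_of_le_length (by omega), htake,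
          PySem.Set.contains_iff, PySem.Set.mem_add]
        simp only [List.mem_append, List.mem_singleton]
        rw [← PySem.Set.contains_iff, h3 t]
      · intro f
        rw [List.take_append_of_le_length (by omega), htake]
        simp only [List.mem_append, List.mem_singleton, mem_bkt, h4 f]
        constructor
        · rintro (⟨hl, hr⟩ | ⟨hl, rfl⟩)
          · exact ⟨hl, Or.inl hr⟩
          · exact ⟨hl, Or.inr rfl⟩
        · rintro ⟨hl, h | rfl⟩
          · exact Or.inl ⟨hl, h⟩
          · exact Or.inr ⟨hl, rfl⟩
      · rw [List.nodup_append]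
        refine ⟨h5, nodup_bkt facts s, ?_⟩
        intro f hfres g hfg
        rintro rfl
        refine absurd ?_ hsdone
        rw [← ((mem_bkt facts s f).1 hfg).2]
        exact ((h4 f).1 hfres).2
      · simp only [List.length_append, List.length_map]
        omega
      · simp only [List.length_append, List.length_map]
        omega

theorem sim (facts : List (String × String)) : ∀ (fb : Nat) (rest : List String)
    (fa : Nat) (queue : List String) (i : Nat) (nextf : List String)
    (done : PySem.Set String) (result : List (String × String)),
    i ≤ queue.length →
    queue.drop i = rest ++ nextf →
    (∀ t, PySem.Set.contains done t = true ↔ t ∈ queue.take i) →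
    (∀ f : String × String, f ∈ result ↔ f ∈ facts ∧ f.2 ∈ queue.take i) →
    result.Nodup →
    queue.length + facts.length ≤ fa + result.length + i →
    1 + facts.length + nextf.length ≤ (fb + 1) + result.length →
    checkLoopA fa facts queue i result
      = loopB (fb + 1) (dedupGroupB facts).2 rest nextf done result := by
  intro fb
  induction fb with
  | zero =>
    refine simLevel facts 0 ?_
    intro fr fa queue i done result _ _ _ h4 h5 _ h7
    have hrlen : result.length ≤ facts.length :=
      res_le facts result h5 (fun f hf => ((h4 f).1 hf).1)
    exact (by omega : False).elim
  | succ fb ihfb =>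
    refine simLevel facts (fb + 1) ?_
    intro fr fa queue i done result h1 h2 h3 h4 h5 h6 h7
    refine ihfb fr fa queue i [] done result h1 (by simpa using h2) h3 h4 h5 h6 ?_
    simpa using h7

-- ===== VERDICT (by name: the statement is the Claim_ definition above) =====
theorem check_spec : Claim_equal_check := by
  intro knowns facts _
  unfold Spec_check check check_alt
  refine sim facts facts.length knowns (knowns.length + facts.length) knowns 0 [] PySem.Set.empty []
    (by omega) (by simp) ?_ (by simp) List.nodup_nil (by simp) (by simp only [List.length_nil]; omega)
  intro t
  rw [PySem.Set.contains_iff]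
  simp [PySem.Set.empty]
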